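-- pv_equiv track=rewrite | github.com/igu9/trabalhoPI | pi-trabalho/mnist-reader.py | inverteImagem
-- ===== SOURCE A (Python) =====
-- def inverteImagem(img):
--     imagem = img.copy()
--
--     for idx, px in enumerate(imagem):
--         if px != 0:
--             imagem[idx] = -1
--
--     for idx, px in enumerate(imagem):
--         if px == 0:
--             imagem[idx] = 255
--
--     for idx, px in enumerate(imagem):
--         if px == -1:
--             imagem[idx] = 0
--
--     return imagem
-- ===== SOURCE B (Python) =====
-- def inverteImagem(img):
--     imagem = img.copy()
--     for idx, px in enumerate(imagem):
--         imagem[idx] = 255 if px == 0 else 0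
--     return imagem
-- ===== Notes on version B (the rewrite author's own statement) =====
-- stated objective: simpler
-- what changed: Fuses A's three passes (mark nonzero as -1, zero->255, -1->0) into one pass applying the net mapping 0->255, nonzero->0 directly, dropping the -1 sentinel.
import Mathlib
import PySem

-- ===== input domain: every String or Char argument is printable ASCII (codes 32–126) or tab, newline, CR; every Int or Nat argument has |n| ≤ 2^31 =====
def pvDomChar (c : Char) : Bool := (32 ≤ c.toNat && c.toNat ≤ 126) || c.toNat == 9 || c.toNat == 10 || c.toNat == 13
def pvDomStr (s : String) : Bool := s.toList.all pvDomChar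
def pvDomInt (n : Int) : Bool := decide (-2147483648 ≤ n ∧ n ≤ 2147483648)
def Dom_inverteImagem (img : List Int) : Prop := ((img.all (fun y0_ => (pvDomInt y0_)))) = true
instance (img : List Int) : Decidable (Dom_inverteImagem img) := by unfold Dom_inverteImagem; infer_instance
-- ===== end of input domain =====

-- B fuses A's three passes into one, applying the net mapping 0->255, nonzero->0 (simpler).

-- ===== PORT A =====
-- pass 1: every nonzero pixel becomes -1
def invPass1 : List Int → List Int
  | [] => []
  | px :: rest => (if px ≠ 0 then -1 else px) :: invPass1 rest

-- pass 2: every zero pixel becomes 255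
def invPass2 : List Int → List Int
  | [] => []
  | px :: rest => (if px = 0 then 255 else px) :: invPass2 rest

-- pass 3: every -1 pixel becomes 0
def invPass3 : List Int → List Int
  | [] => []
  | px :: rest => (if px = -1 then 0 else px) :: invPass3 rest

def inverteImagem (img : List Int) : List Int :=
  invPass3 (invPass2 (invPass1 img))

-- ===== PORT B =====
def inverteImagem_alt (img : List Int) : List Int :=
  img.map (fun px => if px = 0 then 255 else 0)

-- ===== PRECONDITION & SPEC =====
def Spec_inverteImagem (img : List Int) (out : List Int) : Prop := out = inverteImagem_alt img
instance (img : List Int) (out : List Int) : Decidable (Spec_inverteImagem img out) := by unfold Spec_inverteImagem; infer_instance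

-- ===== CLAIM (what is proved, stated in full; the proofs are below) =====
def Claim_equal_inverteImagem : Prop := ∀ (img : List Int), Dom_inverteImagem img → Spec_inverteImagem img (inverteImagem img)

-- ===== LEMMAS AND PROOFS =====
theorem invPasses_eq_map (img : List Int) :
    invPass3 (invPass2 (invPass1 img)) = img.map (fun px => if px = 0 then 255 else 0) := by
  induction img with
  | nil => rfl
  | cons px rest ih =>
    simp only [invPass1, invPass2, invPass3, List.map]
    by_cases h : px = 0 <;> simp [h, ih]

-- ===== VERDICT (by name: the statement is the Claim_ definition above) =====
theorem inverteImagem_spec : Claim_equal_inverteImagem := by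
  intro img _
  unfold Spec_inverteImagem inverteImagem inverteImagem_alt
  exact invPasses_eq_map img
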